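-- pv_equiv track=rewrite | github.com/Seek-Techs/civilapply | civil_engineering/cv_adapter/skill_weighting.py | weight_skills
-- ===== SOURCE A (Python) =====
-- def weight_skills(skills, intelligence):
--     emphasized = intelligence.get("emphasize", [])
--     downplayed = intelligence.get("downplay", [])
--
--     emphasized_skills = []
--     neutral_skills = []
--     downplayed_skills = []
--
--     for skill in skills:
--         skill_lower = skill.lower()
--
--         if any(key in skill_lower for key in emphasized):
--             emphasized_skills.append(skill)
--         elif any(key in skill_lower for key in downplayed):
--             downplayed_skills.append(skill)
--         else:
--             neutral_skills.append(skill)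
--
--     # Final ordered skill list
--     return emphasized_skills + neutral_skills + downplayed_skills
-- ===== SOURCE B (Python) =====
-- def weight_skills(skills, intelligence):
--     emphasized = intelligence.get("emphasize", [])
--     downplayed = intelligence.get("downplay", [])
--
--     def priority(skill):
--         s = skill.lower()
--         if any(key in s for key in emphasized):
--             return 0
--         if any(key in s for key in downplayed):
--             return 2
--         return 1
--
--     return sorted(skills, key=priority)
-- ===== Notes on version B (the rewrite author's own statement) =====
-- stated objective: simpler
-- what changed: Replaced the three explicit buckets and final concatenation by a single stable sort of the input under a 0/1/2 priority key (emphasized=0, neutral=1, downplayed=2), checking emphasized first so it keeps A's elif priority and relying on sort stability for intra-group order.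
import Mathlib
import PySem

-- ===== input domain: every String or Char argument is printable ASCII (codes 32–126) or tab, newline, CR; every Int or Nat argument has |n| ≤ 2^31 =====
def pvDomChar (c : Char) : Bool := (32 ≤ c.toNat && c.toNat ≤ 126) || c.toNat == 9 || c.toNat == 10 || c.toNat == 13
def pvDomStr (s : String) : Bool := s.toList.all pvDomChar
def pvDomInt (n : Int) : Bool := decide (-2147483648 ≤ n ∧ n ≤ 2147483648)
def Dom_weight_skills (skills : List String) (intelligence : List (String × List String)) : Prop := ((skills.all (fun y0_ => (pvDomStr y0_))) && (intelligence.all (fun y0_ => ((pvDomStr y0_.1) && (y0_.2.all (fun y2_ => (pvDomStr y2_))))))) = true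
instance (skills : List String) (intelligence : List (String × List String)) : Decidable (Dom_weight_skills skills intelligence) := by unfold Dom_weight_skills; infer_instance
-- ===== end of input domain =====

-- B replaces A's three explicit buckets + concatenation by one stable sort under a 0/1/2 priority key (simpler decomposition, same results).


-- ===== PORT A =====
def weight_skills (skills : List String) (intelligence : List (String × List String)) : List String :=
  let emphasized := PySem.Dict.getD (PySem.Dict.mk intelligence) "emphasize" []
  let downplayed := PySem.Dict.getD (PySem.Dict.mk intelligence) "downplay" []
  let r := skills.foldl
    (fun (acc : List String × List String × List String) skill =>
      let skill_lower := PySem.Str.lower skill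
      if emphasized.any (fun key => PySem.Str.isIn key skill_lower) then
        (acc.1 ++ [skill], acc.2.1, acc.2.2)
      else if downplayed.any (fun key => PySem.Str.isIn key skill_lower) then
        (acc.1, acc.2.1, acc.2.2 ++ [skill])
      else
        (acc.1, acc.2.1 ++ [skill], acc.2.2))
    ([], [], [])
  r.1 ++ r.2.1 ++ r.2.2

-- ===== PORT B =====
-- B's priority key: 0 = emphasized, 2 = downplayed, 1 = neutral (emphasized checked first)
def pvPriority (emphasized downplayed : List String) (skill : String) : Int :=
  let s := PySem.Str.lower skill
  if emphasized.any (fun key => PySem.Str.isIn key s) then 0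
  else if downplayed.any (fun key => PySem.Str.isIn key s) then 2
  else 1

def weight_skills_alt (skills : List String) (intelligence : List (String × List String)) : List String :=
  let emphasized := PySem.Dict.getD (PySem.Dict.mk intelligence) "emphasize" []
  let downplayed := PySem.Dict.getD (PySem.Dict.mk intelligence) "downplay" []
  PySem.List.sorted skills (pvPriority emphasized downplayed) false

-- ===== PRECONDITION & SPEC =====
def Spec_weight_skills (skills : List String) (intelligence : List (String × List String)) (out : List String) : Prop := out = weight_skills_alt skills intelligence
instance (skills : List String) (intelligence : List (String × List String)) (out : List String) : Decidable (Spec_weight_skills skills intelligence out) := by unfold Spec_weight_skills; infer_instance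

-- ===== CLAIM (what is proved, stated in full; the proofs are below) =====
def Claim_equal_weight_skills : Prop := ∀ (skills : List String) (intelligence : List (String × List String)), Dom_weight_skills skills intelligence → Spec_weight_skills skills intelligence (weight_skills skills intelligence)

-- ===== LEMMAS AND PROOFS =====

-- insert after a block that does not go before x and before a block that entirely does
lemma insertBy_middle {α : Type} (b : α → α → Bool) (x : α) :
    ∀ (u v : List α), (∀ y ∈ u, b x y = false) → (∀ y ∈ v, b x y = true) →
    PySem.List.insertBy b x (u ++ v) = u ++ x :: v := by
  intro u
  induction u with
  | nil =>
    intro v _ hv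
    cases v with
    | nil => simp [PySem.List.insertBy]
    | cons y ys => simp [PySem.List.insertBy, hv y (by simp)]
  | cons h t ih =>
    intro v hu hv
    simp only [List.cons_append, PySem.List.insertBy, hu h (by simp)]
    simp [ih v (fun y hy => hu y (by simp [hy])) hv]

-- stable sort under a {0,1,2}-valued key is the three filters concatenated
lemma sorted3_aux (key : String → Int) :
    ∀ (xs a0 a1 a2 : List String),
    (∀ x ∈ a0, key x = 0) → (∀ x ∈ a1, key x = 1) → (∀ x ∈ a2, key x = 2) →
    (∀ x ∈ xs, key x = 0 ∨ key x = 1 ∨ key x = 2) →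
    xs.foldl (fun acc x => PySem.List.insertBy (fun a b => decide (key a < key b)) x acc) (a0 ++ a1 ++ a2)
      = (a0 ++ xs.filter (fun x => key x == 0)) ++ (a1 ++ xs.filter (fun x => key x == 1))
        ++ (a2 ++ xs.filter (fun x => key x == 2)) := by
  intro xs
  induction xs with
  | nil => intro a0 a1 a2 _ _ _ _; simp
  | cons x t ih =>
    intro a0 a1 a2 h0 h1 h2 hx
    simp only [List.foldl_cons]
    rcases hx x (by simp) with h | h | h
    · have : PySem.List.insertBy (fun a b => decide (key a < key b)) x (a0 ++ a1 ++ a2)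
          = (a0 ++ [x]) ++ a1 ++ a2 := by
        rw [List.append_assoc, insertBy_middle _ _ a0 (a1 ++ a2)
          (by intro y hy; simp [h0 y hy, h])
          (by intro y hy
              rcases List.mem_append.1 hy with hy | hy
              · simp [h1 y hy, h]
              · simp [h2 y hy, h])]
        simp
      rw [this, ih (a0 ++ [x]) a1 a2
        (by intro y hy; rcases List.mem_append.1 hy with hy | hy
            · exact h0 y hy
            · simp at hy; simp [hy, h]) h1 h2 (fun y hy => hx y (by simp [hy]))]
      simp [List.filter_cons, h]
    · have : PySem.List.insertBy (fun a b => decide (key a < key b)) x (a0 ++ a1 ++ a2)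
          = a0 ++ (a1 ++ [x]) ++ a2 := by
        rw [insertBy_middle _ _ (a0 ++ a1) a2
          (by intro y hy
              rcases List.mem_append.1 hy with hy | hy
              · simp [h0 y hy, h]
              · simp [h1 y hy, h])
          (by intro y hy; simp [h2 y hy, h])]
        simp
      rw [this, ih a0 (a1 ++ [x]) a2 h0
        (by intro y hy; rcases List.mem_append.1 hy with hy | hy
            · exact h1 y hy
            · simp at hy; simp [hy, h]) h2 (fun y hy => hx y (by simp [hy]))]
      simp [List.filter_cons, h]
    · have : PySem.List.insertBy (fun a b => decide (key a < key b)) x (a0 ++ a1 ++ a2)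
          = a0 ++ a1 ++ (a2 ++ [x]) := by
        have := insertBy_middle (fun a b => decide (key a < key b)) x (a0 ++ a1 ++ a2) []
          (by intro y hy
              rcases List.mem_append.1 hy with hy | hy
              · rcases List.mem_append.1 hy with hy | hy
                · simp [h0 y hy, h]
                · simp [h1 y hy, h]
              · simp [h2 y hy, h])
          (by simp)
        simpa using this
      rw [this, ih a0 a1 (a2 ++ [x]) h0 h1
        (by intro y hy; rcases List.mem_append.1 hy with hy | hy
            · exact h2 y hy
            · simp at hy; simp [hy, h]) (fun y hy => hx y (by simp [hy]))]
      simp [List.filter_cons, h]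

-- A's triple-bucket loop computes the three filters
lemma a_fold_aux (emphasized downplayed : List String) :
    ∀ (xs : List String) (e n d : List String),
    xs.foldl
      (fun (acc : List String × List String × List String) skill =>
        if emphasized.any (fun key => PySem.Str.isIn key (PySem.Str.lower skill)) then
          (acc.1 ++ [skill], acc.2.1, acc.2.2)
        else if downplayed.any (fun key => PySem.Str.isIn key (PySem.Str.lower skill)) then
          (acc.1, acc.2.1, acc.2.2 ++ [skill])
        else
          (acc.1, acc.2.1 ++ [skill], acc.2.2))
      (e, n, d)
      = (e ++ xs.filter (fun x => pvPriority emphasized downplayed x == 0),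
         n ++ xs.filter (fun x => pvPriority emphasized downplayed x == 1),
         d ++ xs.filter (fun x => pvPriority emphasized downplayed x == 2)) := by
  intro xs
  induction xs with
  | nil => intro e n d; simp
  | cons x t ih =>
    intro e n d
    simp only [List.foldl_cons]
    by_cases h1 : (emphasized.any fun key => PySem.Str.isIn key (PySem.Str.lower x)) = true
    · have hp : pvPriority emphasized downplayed x = 0 := by
        simp only [pvPriority]; rw [if_pos h1]
      rw [if_pos h1, ih]
      simp [List.filter_cons, hp]
    · by_cases h2 : (downplayed.any fun key => PySem.Str.isIn key (PySem.Str.lower x)) = true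
      · have hp : pvPriority emphasized downplayed x = 2 := by
          simp only [pvPriority]; rw [if_neg h1, if_pos h2]
        rw [if_neg h1, if_pos h2, ih]
        simp [List.filter_cons, hp]
      · have hp : pvPriority emphasized downplayed x = 1 := by
          simp only [pvPriority]; rw [if_neg h1, if_neg h2]
        rw [if_neg h1, if_neg h2, ih]
        simp [List.filter_cons, hp]

lemma main_eq (skills : List String) (intelligence : List (String × List String)) :
    weight_skills skills intelligence = weight_skills_alt skills intelligence := by
  unfold weight_skills weight_skills_alt
  simp only [a_fold_aux]
  rw [PySem.List.sorted_eq_foldl_insertBy]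
  have := sorted3_aux
    (pvPriority (PySem.Dict.getD (PySem.Dict.mk intelligence) "emphasize" []) (PySem.Dict.getD (PySem.Dict.mk intelligence) "downplay" []))
    skills [] [] [] (by simp) (by simp) (by simp)
    (by intro x _; simp only [pvPriority]; split_ifs <;> simp)
  simpa using this.symm

-- ===== VERDICT (by name: the statement is the Claim_ definition above) =====
theorem weight_skills_spec : Claim_equal_weight_skills := by
  intro skills intelligence _
  unfold Spec_weight_skills
  exact main_eq skills intelligence
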